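-- pv_equiv track=rewrite | github.com/minus9d/programming_contest_archive | abc/140/f/f.later.py | solve
-- ===== SOURCE A (Python) =====
-- def solve(N, S):
--     S = sorted(S)
--     used = [S[-1]]
--     unused = S[:-1]
--     for _ in range(N):
--         next_used = []
--         next_unused = []
--         for p in used[::-1]:
--             while unused:
--                 x = unused.pop()
--                 if x < p:
--                     next_used.append(x)
--                     break
--                 else:
--                     next_unused.append(x)
--                     continue
--         used += next_used
--         used.sort()
--         unused = unused + next_unused[::-1]
--
--     return len(used) == (2**N)
-- ===== SOURCE B (Python) =====
-- def merge_desc(xs, ys):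
--     """Linear merge of two descending-sorted lists into one descending-sorted list."""
--     out = []
--     i = j = 0
--     while i < len(xs) and j < len(ys):
--         if xs[i] >= ys[j]:
--             out.append(xs[i]); i += 1
--         else:
--             out.append(ys[j]); j += 1
--     out.extend(xs[i:])
--     out.extend(ys[j:])
--     return out
--
--
-- def solve(N, S):
--     desc = sorted(S, reverse=True)
--     used = [desc[0]]      # descending
--     unused = desc[1:]     # descending
--     for _ in range(N):
--         taken = []        # values grabbed this round, descending
--         kept = []         # values inspected but not grabbed, descending
--         i = 0
--         for p in used:    # used is descending, so p runs large-to-small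
--             while i < len(unused) and unused[i] >= p:
--                 kept.append(unused[i]); i += 1
--             if i < len(unused):
--                 taken.append(unused[i]); i += 1
--         unused = kept + unused[i:]
--         used = merge_desc(used, taken)
--     return len(used) == 2 ** N
-- ===== Notes on version B (the rewrite author's own statement) =====
-- stated objective: alternative
-- what changed: Each round's grab phase becomes one two-pointer sweep over the descending sorted unused run (no pop-and-rebuild of unused), and the per-round used.sort() is replaced by a linear merge of the two already-sorted descending runs.
import Mathlib
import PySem

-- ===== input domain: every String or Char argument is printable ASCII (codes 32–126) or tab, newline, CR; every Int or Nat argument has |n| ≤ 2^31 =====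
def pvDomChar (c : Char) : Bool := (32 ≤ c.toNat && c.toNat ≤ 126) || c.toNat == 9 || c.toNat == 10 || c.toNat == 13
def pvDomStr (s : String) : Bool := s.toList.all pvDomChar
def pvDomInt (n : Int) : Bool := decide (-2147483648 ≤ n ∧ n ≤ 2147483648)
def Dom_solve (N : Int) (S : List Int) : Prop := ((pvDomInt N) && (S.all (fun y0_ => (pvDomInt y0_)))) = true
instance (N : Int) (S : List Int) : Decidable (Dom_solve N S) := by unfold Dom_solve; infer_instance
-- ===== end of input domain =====

-- B replaces A's per-round `used.sort()` and pop-and-rebuild of `unused` by a linear merge of the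
-- two already-sorted descending runs and a single two-pointer sweep over `unused` (an alternative
-- algorithm, not claimed faster); A only mutates its local copies, so return-value equivalence is the whole story.

-- ===== PORT A =====
-- the inner `while unused: x = unused.pop(); …` of A: pops from the END of `unused`;
-- returns (remaining unused, next_used after possible append, next_unused after appends)
def aGrab (p : Int) (unused nu nn : List Int) : List Int × List Int × List Int :=
  if h : unused = [] then (unused, nu, nn)
  else
    let x := unused.getLast h
    let rest := unused.dropLast
    if x < p then (rest, nu ++ [x], nn)
    else aGrab p rest nu (nn ++ [x])
termination_by unused.length
decreasing_by
  simp only [List.length_dropLast]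
  exact Nat.sub_lt (List.length_pos_iff.mpr h) Nat.one_pos

-- one round of A: the `for p in used[::-1]` loop (used[::-1] is used.reverse, exact per
-- PySem.List.slice?_none_none_neg_one), then `used += next_used; used.sort()` and
-- `unused = unused + next_unused[::-1]`
def aRound (used unused : List Int) : List Int × List Int :=
  let st := used.reverse.foldl (fun st p => aGrab p st.1 st.2.1 st.2.2) (unused, [], [])
  (PySem.List.sorted (used ++ st.2.1) (fun x => x) false, st.1 ++ st.2.2.reverse)

-- `for _ in range(N)` (empty for N ≤ 0, as in Python)
def aLoop : Nat → List Int × List Int → List Int × List Int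
  | 0, st => st
  | n + 1, st => aLoop n (aRound st.1 st.2)

def solve (N : Int) (S : List Int) : Bool :=
  match PySem.List.pyGet? (PySem.List.sorted S (fun x => x) false) (-1) with
  | none => false      -- S == []: Python raises IndexError on S[-1]; excluded by Pre_solve
  | some last =>
    let st := aLoop N.toNat ([last],
      PySem.List.slice (PySem.List.sorted S (fun x => x) false) none (some (-1)))
    -- `len(used) == 2**N`: for N < 0 Python's 2**N is a fraction < 1 < len(used), never equal,
    -- captured exactly by the 0 ≤ N conjunct
    decide (0 ≤ N ∧ (st.1.length : Int) = 2 ^ N.toNat)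

-- ===== PORT B =====
-- merge_desc from Source B: linear merge of two descending-sorted lists
def mergeDesc : List Int → List Int → List Int
  | [], ys => ys
  | x :: xs, [] => x :: xs
  | x :: xs, y :: ys =>
    if x ≥ y then x :: mergeDesc xs (y :: ys) else y :: mergeDesc (x :: xs) ys

-- the inner `while i < len(unused) and unused[i] >= p` sweep: splits `unused` into
-- (the skipped prefix, the rest)
def bSkip (p : Int) : List Int → List Int × List Int
  | [] => ([], [])
  | x :: xs =>
    if x ≥ p then
      let pr := bSkip p xs
      (x :: pr.1, pr.2)
    else ([], x :: xs)

-- the `for p in used` loop of Source B: returns (taken, kept, untouched rest of unused)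
def bRound : List Int → List Int → List Int × List Int × List Int
  | [], un => ([], [], un)
  | p :: ps, un =>
    let pr := bSkip p un
    match pr.2 with
    | [] =>
      let tkr := bRound ps []
      (tkr.1, pr.1 ++ tkr.2.1, tkr.2.2)
    | x :: xs =>
      let tkr := bRound ps xs
      (x :: tkr.1, pr.1 ++ tkr.2.1, tkr.2.2)

def bLoop : Nat → List Int × List Int → List Int × List Int
  | 0, st => st
  | n + 1, st =>
    let tkr := bRound st.1 st.2
    bLoop n (mergeDesc st.1 tkr.1, tkr.2.1 ++ tkr.2.2)

def solve_alt (N : Int) (S : List Int) : Bool :=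
  match PySem.List.sorted S (fun x => x) true with
  | [] => false      -- S == []: Source B raises IndexError on desc[0]; excluded by Pre_solve
  | d0 :: rest =>
    let st := bLoop N.toNat ([d0], rest)
    decide (0 ≤ N ∧ (st.1.length : Int) = 2 ^ N.toNat)

-- ===== PRECONDITION & SPEC =====
-- Pre_ excludes only the empty list, on which both A and B raise IndexError (S[-1] / desc[0]).
def Pre_solve (N : Int) (S : List Int) : Prop := S ≠ []
instance (N : Int) (S : List Int) : Decidable (Pre_solve N S) := by unfold Pre_solve; infer_instance
def pvWitness_solve : Int × List Int := (2, [3, 1, 4, 1, 5])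

def Spec_solve (N : Int) (S : List Int) (out : Bool) : Prop := out = solve_alt N S
instance (N : Int) (S : List Int) (out : Bool) : Decidable (Spec_solve N S out) := by unfold Spec_solve; infer_instance

-- ===== CLAIM (what is proved, stated in full; the proofs are below) =====
def Claim_equal_solve : Prop := ∀ (N : Int) (S : List Int), Dom_solve N S → Pre_solve N S → Spec_solve N S (solve N S)

-- ===== LEMMAS AND PROOFS =====

-- descending-sorted predicate used throughout
def PWge (l : List Int) : Prop := List.Pairwise (fun a b : Int => b ≤ a) l

theorem bSkip_append (p : Int) (un : List Int) : (bSkip p un).1 ++ (bSkip p un).2 = un := by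
  induction un with
  | nil => simp [bSkip]
  | cons x xs ih =>
    by_cases h : x ≥ p
    · simp [bSkip, h, ih]
    · simp [bSkip, h]

theorem bRound_nil (ps : List Int) : bRound ps [] = ([], [], []) := by
  induction ps with
  | nil => simp [bRound]
  | cons p ps ih => simp [bRound, bSkip, ih]

theorem bRound_cons (p : Int) (ps un : List Int) :
    bRound (p :: ps) un =
      (match (bSkip p un).2 with
       | [] => ((bRound ps []).1, (bSkip p un).1 ++ (bRound ps []).2.1, (bRound ps []).2.2)
       | x :: xs => (x :: (bRound ps xs).1, (bSkip p un).1 ++ (bRound ps xs).2.1, (bRound ps xs).2.2)) := by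
  rw [bRound]

theorem bRound_sub (ps un : List Int) :
    (bRound ps un).1.Sublist un ∧ ((bRound ps un).2.1 ++ (bRound ps un).2.2).Sublist un := by
  induction ps generalizing un with
  | nil => simp [bRound]
  | cons p ps ih =>
    have hsk := bSkip_append p un
    rcases hrest : (bSkip p un).2 with _ | ⟨x, xs⟩
    · rw [bRound_cons, hrest]
      simp only [bRound_nil, List.append_nil]
      refine ⟨List.nil_sublist un, ?_⟩
      have h1 : (bSkip p un).1.Sublist ((bSkip p un).1 ++ (bSkip p un).2) :=
        List.sublist_append_left _ _
      rw [hsk] at h1; exact h1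
    · rw [bRound_cons, hrest]
      have h1 := ih xs
      constructor
      · have h2 : (x :: (bRound ps xs).1).Sublist (x :: xs) := List.Sublist.cons₂ x h1.1
        have h3 : (x :: xs).Sublist un := by
          rw [← hsk, hrest]; exact List.sublist_append_right _ _
        exact h2.trans h3
      · have h2 : ((bSkip p un).1 ++ ((bRound ps xs).2.1 ++ (bRound ps xs).2.2)).Sublist
            ((bSkip p un).1 ++ (x :: xs)) :=
          List.Sublist.append_left (h1.2.trans (List.sublist_cons_self x xs)) _
        have h4 : ((bSkip p un).1 ++ (x :: xs)) = un := by rw [← hrest, hsk]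
        rw [h4] at h2
        simpa [List.append_assoc] using h2

theorem mergeDesc_perm (xs ys : List Int) : (mergeDesc xs ys).Perm (xs ++ ys) := by
  fun_induction mergeDesc xs ys with
  | case1 ys => simp
  | case2 x xs => simp
  | case3 x xs y ys h ih => simpa using ih.cons x
  | case4 x xs y ys h ih =>
    exact (ih.cons y).trans (List.perm_middle (a := y) (l₁ := x :: xs) (l₂ := ys)).symm

theorem mergeDesc_pairwise (xs ys : List Int) (hx : PWge xs) (hy : PWge ys) :
    PWge (mergeDesc xs ys) := by
  unfold PWge at *
  fun_induction mergeDesc xs ys with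
  | case1 ys => exact hy
  | case2 x xs => exact hx
  | case3 x xs y ys h ih =>
    rw [List.pairwise_cons] at hx ⊢
    refine ⟨fun z hz => ?_, ih hx.2 hy⟩
    have hz' := (mergeDesc_perm xs (y :: ys)).mem_iff.mp hz
    rw [List.mem_append, List.mem_cons] at hz'
    rcases hz' with h1 | h2 | h3
    · exact hx.1 z h1
    · omega
    · have := (List.pairwise_cons.mp hy).1 z h3; omega
  | case4 x xs y ys h ih =>
    rw [List.pairwise_cons] at hy ⊢
    refine ⟨fun z hz => ?_, ih hx hy.2⟩
    have hz' := (mergeDesc_perm (x :: xs) ys).mem_iff.mp hz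
    rw [List.mem_append, List.mem_cons] at hz'
    rcases hz' with (h1 | h2) | h3
    · omega
    · have := (List.pairwise_cons.mp hx).1 z h2; omega
    · exact hy.1 z h3

theorem aGrab_eq (p : Int) (d nu nn : List Int) :
    aGrab p d.reverse nu nn =
      (match (bSkip p d).2 with
       | [] => ([], nu, nn ++ (bSkip p d).1)
       | x :: xs => (xs.reverse, nu ++ [x], nn ++ (bSkip p d).1)) := by
  induction d generalizing nu nn with
  | nil => simp [aGrab, bSkip]
  | cons x xs ih =>
    rw [aGrab]
    have hne : xs.reverse ++ [x] ≠ [] := by simp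
    simp only [List.reverse_cons, dif_neg hne, List.getLast_concat, List.dropLast_concat]
    by_cases hxp : x < p
    · have h' : ¬ x ≥ p := by omega
      simp [bSkip, h', if_pos hxp]
    · have h' : x ≥ p := by omega
      rw [if_neg hxp, ih]
      rcases hr : (bSkip p xs).2 with _ | ⟨y, ys⟩ <;>
        simp [bSkip, h', hr, List.append_assoc]

theorem fold_corr (ps : List Int) (d nu nn : List Int) :
    ps.foldl (fun st p => aGrab p st.1 st.2.1 st.2.2) (d.reverse, nu, nn)
      = ((bRound ps d).2.2.reverse, nu ++ (bRound ps d).1, nn ++ (bRound ps d).2.1) := by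
  induction ps generalizing d nu nn with
  | nil => simp [bRound]
  | cons p ps ih =>
    rw [List.foldl_cons, bRound_cons]
    have hg := aGrab_eq p d nu nn
    rcases hr : (bSkip p d).2 with _ | ⟨x, xs⟩
    · rw [hr] at hg
      simp only [hg]
      have := ih [] nu (nn ++ (bSkip p d).1)
      simp only [List.reverse_nil] at this
      rw [this]
      simp [List.append_assoc]
    · rw [hr] at hg
      simp only [hg]
      rw [ih xs (nu ++ [x]) (nn ++ (bSkip p d).1)]
      simp [List.append_assoc]

theorem round_corr (uB unB : List Int) (hu : PWge uB) (hn : PWge unB) :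
    aRound uB.reverse unB.reverse
      = ((mergeDesc uB (bRound uB unB).1).reverse,
         ((bRound uB unB).2.1 ++ (bRound uB unB).2.2).reverse) := by
  have ht : PWge (bRound uB unB).1 := List.Pairwise.sublist (bRound_sub uB unB).1 hn
  unfold aRound
  rw [List.reverse_reverse, fold_corr uB unB [] []]
  simp only [List.nil_append]
  refine Prod.ext ?_ (by simp)
  show PySem.List.sorted (uB.reverse ++ (bRound uB unB).1) (fun x => x) false
      = (mergeDesc uB (bRound uB unB).1).reverse
  apply PySem.List.sorted_id_eq_of_perm_of_pairwise
  · exact ((List.reverse_perm _).trans (mergeDesc_perm uB (bRound uB unB).1)).trans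
      ((List.reverse_perm uB).append_right _).symm
  · exact List.pairwise_reverse.mpr (mergeDesc_pairwise uB (bRound uB unB).1 hu ht)

theorem loop_corr (n : Nat) (uB unB : List Int) (hu : PWge uB) (hn : PWge unB) :
    aLoop n (uB.reverse, unB.reverse)
      = ((bLoop n (uB, unB)).1.reverse, (bLoop n (uB, unB)).2.reverse) := by
  induction n generalizing uB unB with
  | zero => simp [aLoop, bLoop]
  | succ n ih =>
    have ht : PWge (bRound uB unB).1 := List.Pairwise.sublist (bRound_sub uB unB).1 hn
    have hk : PWge ((bRound uB unB).2.1 ++ (bRound uB unB).2.2) :=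
      List.Pairwise.sublist (bRound_sub uB unB).2 hn
    have hstep : aLoop (n + 1) (uB.reverse, unB.reverse)
        = aLoop n ((mergeDesc uB (bRound uB unB).1).reverse,
            ((bRound uB unB).2.1 ++ (bRound uB unB).2.2).reverse) := by
      show aLoop n (aRound uB.reverse unB.reverse) = _
      rw [round_corr uB unB hu hn]
    rw [hstep, ih _ _ (mergeDesc_pairwise _ _ hu ht) hk]
    rfl

theorem sorted_true_eq (S : List Int) :
    PySem.List.sorted S (fun x => x) true = (PySem.List.sorted S (fun x => x) false).reverse := by
  have h : PySem.List.sorted S (fun x => x) false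
      = (PySem.List.sorted S (fun x => x) true).reverse := by
    apply PySem.List.sorted_id_eq_of_perm_of_pairwise
    · exact (List.reverse_perm _).trans (PySem.List.sorted_perm S (fun x => x) true)
    · exact List.pairwise_reverse.mpr (PySem.List.sorted_pairwise_rev S (fun x => x))
  rw [h, List.reverse_reverse]

-- ===== VERDICT (by name: the statement is the Claim_ definition above) =====
theorem solve_spec : Claim_equal_solve := by
  intro N S _ hS
  unfold Spec_solve solve solve_alt
  have hasc : (PySem.List.sorted S (fun x => x) false) ≠ [] := by
    intro h
    have hp := PySem.List.sorted_perm S (fun x => x) false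
    rw [h] at hp
    exact hS hp.symm.eq_nil
  have hlast : PySem.List.pyGet? (PySem.List.sorted S (fun x => x) false) (-1)
      = some ((PySem.List.sorted S (fun x => x) false).getLast hasc) := by
    rw [PySem.List.pyGet?_neg_one, List.getLast?_eq_some_getLast hasc]
  have hdesc : PySem.List.sorted S (fun x => x) true
      = (PySem.List.sorted S (fun x => x) false).getLast hasc
        :: (PySem.List.sorted S (fun x => x) false).dropLast.reverse := by
    rw [sorted_true_eq]
    conv_lhs => rw [← List.dropLast_append_getLast hasc]
    simp
  have hPWu : PWge [(PySem.List.sorted S (fun x => x) false).getLast hasc] := by simp [PWge]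
  have hPWn : PWge (PySem.List.sorted S (fun x => x) false).dropLast.reverse := by
    unfold PWge
    rw [List.pairwise_reverse]
    exact List.Pairwise.sublist (List.dropLast_sublist _)
      (by simpa using PySem.List.sorted_pairwise S (fun x => x))
  have hloop := loop_corr N.toNat [(PySem.List.sorted S (fun x => x) false).getLast hasc]
      (PySem.List.sorted S (fun x => x) false).dropLast.reverse hPWu hPWn
  simp only [List.reverse_cons, List.reverse_nil, List.nil_append,
    List.reverse_reverse] at hloop
  simp only [hlast, hdesc, PySem.List.slice_to_neg_one, hloop]
  simp
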